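-- pv_equiv track=rewrite | github.com/GonchiJoshnaVardhanReddy/Spider | spider/reporting/severity.py | classify_severity_from_chain
-- ===== SOURCE A (Python) =====
-- from typing import Any
--
-- SEVERITY_ORDER = ("CRITICAL", "HIGH", "MEDIUM", "LOW", "INFO")
--
-- def classify_severity(signals: dict[str, Any]) -> str:
--     """Return severity level based on strongest detected vulnerability signal."""
--     if _is_true(signals.get("system_prompt_leak_detected")):
--         return "CRITICAL"
--     if _is_true(signals.get("policy_leak_detected")):
--         return "HIGH"
--     if _is_true(signals.get("tool_misuse_detected")):
--         return "HIGH"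
--     if _is_true(signals.get("role_override_detected")):
--         return "MEDIUM"
--     if _is_true(signals.get("context_poisoning_detected")):
--         return "MEDIUM"
--     if _is_true(signals.get("refusal_bypass_detected")):
--         return "LOW"
--     return "INFO"
--
-- def classify_severity_from_chain(
--     evaluator_summary: dict[str, Any],
--     verdict_chain: list[dict[str, Any]] | None,
-- ) -> str:
--     """Return maximum severity observed in summary and verdict chain."""
--     levels = [classify_severity(evaluator_summary)]
--     for verdict in verdict_chain or []:
--         if isinstance(verdict, dict):
--             levels.append(classify_severity(verdict))
--     return min(levels, key=lambda level: SEVERITY_ORDER.index(level))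
--
-- def _is_true(value: Any) -> bool:
--     return bool(value is True)
-- ===== SOURCE B (Python) =====
-- _RULES = [
--     ("system_prompt_leak_detected", "CRITICAL"),
--     ("policy_leak_detected", "HIGH"),
--     ("tool_misuse_detected", "HIGH"),
--     ("role_override_detected", "MEDIUM"),
--     ("context_poisoning_detected", "MEDIUM"),
--     ("refusal_bypass_detected", "LOW"),
-- ]
--
--
-- def classify_severity_from_chain(evaluator_summary, verdict_chain):
--     """Transposed scan: no per-dict severity, no min.  Walk the rules in
--     severity order and return the level of the first rule whose flag is True
--     in ANY dict (summary or chain).  Correct because the rule order is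
--     monotone non-increasing in severity, so the first globally-firing rule
--     is exactly the max severity over all dicts."""
--     dicts = [evaluator_summary] + [v for v in (verdict_chain or []) if isinstance(v, dict)]
--     for key, level in _RULES:
--         if any(d.get(key) is True for d in dicts):
--             return level
--     return "INFO"
-- ===== Notes on version B (the rewrite author's own statement) =====
-- stated objective: alternative
-- what changed: B transposes the loops: instead of computing each dict's severity with an if-chain and taking min by SEVERITY_ORDER.index over the collected levels, it scans the six rules once in severity order and returns the level of the first rule whose flag is True in any dict (summary or chain), which is correct because levels are monotone along the rule order; no per-dict level and no min/index is ever computed.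
import Mathlib
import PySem

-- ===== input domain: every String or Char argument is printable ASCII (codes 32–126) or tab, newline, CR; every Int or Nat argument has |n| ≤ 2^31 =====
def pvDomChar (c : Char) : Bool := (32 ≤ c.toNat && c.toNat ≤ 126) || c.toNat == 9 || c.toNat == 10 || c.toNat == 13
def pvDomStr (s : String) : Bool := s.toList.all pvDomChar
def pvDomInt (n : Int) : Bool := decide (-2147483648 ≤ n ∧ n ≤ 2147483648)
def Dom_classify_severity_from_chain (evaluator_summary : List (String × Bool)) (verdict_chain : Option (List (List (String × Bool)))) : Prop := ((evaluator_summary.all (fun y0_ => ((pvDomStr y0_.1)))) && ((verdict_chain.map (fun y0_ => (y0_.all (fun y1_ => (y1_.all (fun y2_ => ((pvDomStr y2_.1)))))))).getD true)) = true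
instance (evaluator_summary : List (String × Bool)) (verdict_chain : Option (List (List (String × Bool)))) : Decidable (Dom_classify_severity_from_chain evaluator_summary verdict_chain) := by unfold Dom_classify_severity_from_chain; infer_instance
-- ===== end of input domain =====

-- B transposes the computation: it scans the six rules in severity order and returns the level of
-- the first rule true in any dict, instead of A's per-dict classification plus min-by-index
-- (objective: alternative; same cost).


-- ===== PORT A =====
def SEVERITY_ORDER : List String := ["CRITICAL", "HIGH", "MEDIUM", "LOW", "INFO"]

-- _is_true(value) = bool(value is True); under the type convention the dict values are Bool,
-- so `signals.get(k) is True` is exact as `get? = some true`.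
def pv_is_true (value : Option Bool) : Bool := value == some true

def pvClassifySeverity (signals : List (String × Bool)) : String :=
  if pv_is_true (PySem.Dict.get? (PySem.Dict.mk signals) "system_prompt_leak_detected") then "CRITICAL"
  else if pv_is_true (PySem.Dict.get? (PySem.Dict.mk signals) "policy_leak_detected") then "HIGH"
  else if pv_is_true (PySem.Dict.get? (PySem.Dict.mk signals) "tool_misuse_detected") then "HIGH"
  else if pv_is_true (PySem.Dict.get? (PySem.Dict.mk signals) "role_override_detected") then "MEDIUM"
  else if pv_is_true (PySem.Dict.get? (PySem.Dict.mk signals) "context_poisoning_detected") then "MEDIUM"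
  else if pv_is_true (PySem.Dict.get? (PySem.Dict.mk signals) "refusal_bypass_detected") then "LOW"
  else "INFO"

-- SEVERITY_ORDER.index(level); every level produced above occurs in SEVERITY_ORDER,
-- so the .getD 0 default is unreachable (Python's ValueError never fires).
def pvSevKey (level : String) : Nat := (PySem.List.index? SEVERITY_ORDER level).getD 0

def classify_severity_from_chain (evaluator_summary : List (String × Bool)) (verdict_chain : Option (List (List (String × Bool)))) : String :=
  let levels : List String := [pvClassifySeverity evaluator_summary]
  -- for verdict in verdict_chain or []: (isinstance(verdict, dict) always holds under the type convention)
  let levels := (verdict_chain.getD []).foldl (fun acc verdict => acc ++ [pvClassifySeverity verdict]) levels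
  -- min(levels, key=...): levels is nonempty, so the .getD default is unreachable
  (PySem.List.min? levels pvSevKey).getD "INFO"

-- ===== PORT B =====
def pvRules : List (String × String) :=
  [("system_prompt_leak_detected", "CRITICAL"),
   ("policy_leak_detected", "HIGH"),
   ("tool_misuse_detected", "HIGH"),
   ("role_override_detected", "MEDIUM"),
   ("context_poisoning_detected", "MEDIUM"),
   ("refusal_bypass_detected", "LOW")]

-- any(d.get(key) is True for d in dicts)
def pvAnyFlag (dicts : List (List (String × Bool))) (key : String) : Bool :=
  dicts.any (fun d => PySem.Dict.get? (PySem.Dict.mk d) key == some true)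

-- the rule loop: return the level of the first rule whose flag is True in any dict
def pvScan : List (String × String) → List (List (String × Bool)) → String
  | [], _ => "INFO"
  | (key, level) :: rest, dicts =>
      if pvAnyFlag dicts key then level else pvScan rest dicts

def classify_severity_from_chain_alt (evaluator_summary : List (String × Bool)) (verdict_chain : Option (List (List (String × Bool)))) : String :=
  -- dicts = [evaluator_summary] + [v for v in (verdict_chain or []) if isinstance(v, dict)];
  -- under the type convention every chain element is a dict, so the filter keeps everything
  pvScan pvRules (evaluator_summary :: (verdict_chain.getD []))

-- ===== PRECONDITION & SPEC =====
def Spec_classify_severity_from_chain (evaluator_summary : List (String × Bool)) (verdict_chain : Option (List (List (String × Bool)))) (out : String) : Prop := out = classify_severity_from_chain_alt evaluator_summary verdict_chain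
instance (evaluator_summary : List (String × Bool)) (verdict_chain : Option (List (List (String × Bool)))) (out : String) : Decidable (Spec_classify_severity_from_chain evaluator_summary verdict_chain out) := by unfold Spec_classify_severity_from_chain; infer_instance

-- ===== CLAIM (what is proved, stated in full; the proofs are below) =====
def Claim_equal_classify_severity_from_chain : Prop := ∀ (evaluator_summary : List (String × Bool)) (verdict_chain : Option (List (List (String × Bool)))), Dom_classify_severity_from_chain evaluator_summary verdict_chain → Spec_classify_severity_from_chain evaluator_summary verdict_chain (classify_severity_from_chain evaluator_summary verdict_chain)

-- ===== LEMMAS AND PROOFS =====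

-- the common six-flag if-chain shape shared by classify (flags of one dict) and the rule scan
-- (flags over all dicts)
def sixChain (b1 b2 b3 b4 b5 b6 : Bool) : String :=
  if b1 then "CRITICAL" else if b2 then "HIGH" else if b3 then "HIGH"
  else if b4 then "MEDIUM" else if b5 then "MEDIUM" else if b6 then "LOW" else "INFO"

-- proof-side binary minimum by severity key
def pvMinB (a b : String) : String := if pvSevKey a ≤ pvSevKey b then a else b

def pvFlag (d : List (String × Bool)) (k : String) : Bool :=
  PySem.Dict.get? (PySem.Dict.mk d) k == some true

theorem classify_as_sixChain (d : List (String × Bool)) :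
    pvClassifySeverity d =
      sixChain (pvFlag d "system_prompt_leak_detected") (pvFlag d "policy_leak_detected")
        (pvFlag d "tool_misuse_detected") (pvFlag d "role_override_detected")
        (pvFlag d "context_poisoning_detected") (pvFlag d "refusal_bypass_detected") := rfl

theorem scan_as_sixChain (ds : List (List (String × Bool))) :
    pvScan pvRules ds =
      sixChain (pvAnyFlag ds "system_prompt_leak_detected") (pvAnyFlag ds "policy_leak_detected")
        (pvAnyFlag ds "tool_misuse_detected") (pvAnyFlag ds "role_override_detected")
        (pvAnyFlag ds "context_poisoning_detected") (pvAnyFlag ds "refusal_bypass_detected") := rfl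

theorem anyFlag_cons (d : List (String × Bool)) (ds : List (List (String × Bool))) (k : String) :
    pvAnyFlag (d :: ds) k = (pvFlag d k || pvAnyFlag ds k) := by
  simp [pvAnyFlag, pvFlag]

theorem sixChain_mem (b1 b2 b3 b4 b5 b6 : Bool) :
    sixChain b1 b2 b3 b4 b5 b6 ∈ SEVERITY_ORDER := by
  unfold sixChain SEVERITY_ORDER; split_ifs <;> simp

theorem scan_mem (ds : List (List (String × Bool))) : pvScan pvRules ds ∈ SEVERITY_ORDER := by
  rw [scan_as_sixChain]; exact sixChain_mem ..

theorem classify_mem (d : List (String × Bool)) : pvClassifySeverity d ∈ SEVERITY_ORDER := by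
  rw [classify_as_sixChain]; exact sixChain_mem ..

-- splitting the flags splits the chain into a minimum (levels are monotone along the rules)
theorem sixChain_or : ∀ (g1 g2 g3 g4 g5 g6 h1 h2 h3 h4 h5 h6 : Bool),
    sixChain (g1 || h1) (g2 || h2) (g3 || h3) (g4 || h4) (g5 || h5) (g6 || h6) =
      pvMinB (sixChain g1 g2 g3 g4 g5 g6) (sixChain h1 h2 h3 h4 h5 h6) := by decide

theorem pvMinB_assoc {a b c : String} (ha : a ∈ SEVERITY_ORDER) (hb : b ∈ SEVERITY_ORDER)
    (hc : c ∈ SEVERITY_ORDER) : pvMinB (pvMinB a b) c = pvMinB a (pvMinB b c) := by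
  fin_cases ha <;> fin_cases hb <;> fin_cases hc <;> rfl

theorem pvMinB_info {a : String} (ha : a ∈ SEVERITY_ORDER) : pvMinB a "INFO" = a := by
  fin_cases ha <;> rfl

-- A's fold step, on the five levels, is pvMinB
theorem step_eq_minB {b x : String} (hb : b ∈ SEVERITY_ORDER) (hx : x ∈ SEVERITY_ORDER) :
    (if pvSevKey x < pvSevKey b then x else b) = pvMinB b x := by
  fin_cases hb <;> fin_cases hx <;> rfl

theorem pvMinB_mem {a b : String} (ha : a ∈ SEVERITY_ORDER) (hb : b ∈ SEVERITY_ORDER) :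
    pvMinB a b ∈ SEVERITY_ORDER := by
  unfold pvMinB; split_ifs <;> assumption

-- Python's min over a nonempty list as a running fold
theorem min?_cons_foldl (b : String) (l : List String) (key : String → Nat) :
    PySem.List.min? (b :: l) key =
      some (l.foldl (fun best x => if key x < key best then x else best) b) := by
  simp only [PySem.List.min?]
  induction l generalizing b with
  | nil => rfl
  | cons x t ih => simp only [List.foldl_cons]; split <;> exact ih _

-- A's min-fold over the per-dict levels equals B's transposed rule scan combined with pvMinB
theorem scan_foldl (ds : List (List (String × Bool))) (b : String) (hb : b ∈ SEVERITY_ORDER) :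
    (ds.map pvClassifySeverity).foldl (fun best x => if pvSevKey x < pvSevKey best then x else best) b =
      pvMinB b (pvScan pvRules ds) := by
  induction ds generalizing b with
  | nil => simpa [scan_as_sixChain, pvAnyFlag, sixChain] using (pvMinB_info hb).symm
  | cons d t ih =>
      simp only [List.map_cons, List.foldl_cons]
      rw [step_eq_minB hb (classify_mem d), ih _ (pvMinB_mem hb (classify_mem d))]
      rw [scan_as_sixChain (d :: t)]
      simp only [anyFlag_cons]
      rw [sixChain_or, ← classify_as_sixChain, ← scan_as_sixChain]
      exact pvMinB_assoc hb (classify_mem d) (scan_mem t)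

-- ===== VERDICT (by name: the statement is the Claim_ definition above) =====
theorem classify_severity_from_chain_spec : Claim_equal_classify_severity_from_chain := by
  intro es vc _
  unfold Spec_classify_severity_from_chain classify_severity_from_chain classify_severity_from_chain_alt
  simp only [PySem.List.foldl_append_singleton_eq_map, List.singleton_append, min?_cons_foldl,
    Option.getD_some]
  rw [scan_foldl _ _ (classify_mem es), scan_as_sixChain (es :: _)]
  simp only [anyFlag_cons]
  rw [sixChain_or, ← classify_as_sixChain, ← scan_as_sixChain]
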